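-- pv_equiv track=rewrite | github.com/fatima-elfat/programmingChallenges | challenge012.py | findSameChar
-- ===== SOURCE A (Python) =====
-- def findSameChar(input01: str, input02: str) -> str:
--     res = ""
--     input01 = sorted(input01)
--     input02 = sorted(input02)
--     for i in input01:
--         for j in range(len(input02)):
--             if i == input02[j]:
--                 res += i
--     return res
-- ===== SOURCE B (Python) =====
-- def findSameChar(input01: str, input02: str) -> str:
--     c1 = {}
--     for ch in input01:
--         c1[ch] = c1.get(ch, 0) + 1
--     c2 = {}
--     for ch in input02:
--         c2[ch] = c2.get(ch, 0) + 1
--     return "".join(ch * (c1.get(ch, 0) * c2.get(ch, 0)) for ch in sorted(c1))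
-- ===== Notes on version B (the rewrite author's own statement) =====
-- stated objective: simpler
-- what changed: A's per-occurrence nested loops over the two sorted strings are replaced by two frequency dictionaries built in one pass each, then a single pass over the sorted distinct characters of input01 emitting each character count1*count2 times.
import Mathlib
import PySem

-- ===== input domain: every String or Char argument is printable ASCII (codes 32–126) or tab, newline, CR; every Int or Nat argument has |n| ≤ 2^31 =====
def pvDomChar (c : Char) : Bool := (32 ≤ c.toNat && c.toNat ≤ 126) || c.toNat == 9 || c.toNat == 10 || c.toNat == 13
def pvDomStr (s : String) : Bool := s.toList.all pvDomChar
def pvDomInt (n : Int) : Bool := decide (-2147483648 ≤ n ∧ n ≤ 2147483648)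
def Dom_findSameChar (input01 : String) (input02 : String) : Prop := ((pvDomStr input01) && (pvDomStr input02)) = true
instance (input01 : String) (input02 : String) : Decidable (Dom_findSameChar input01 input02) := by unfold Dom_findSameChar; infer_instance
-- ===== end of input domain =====

-- B replaces A's per-occurrence nested loops by frequency dictionaries and one pass over the
-- sorted distinct characters, emitting each character count1*count2 times (objective: simpler).

-- ===== PORT A =====
def findSameChar (input01 : String) (input02 : String) : String :=
  let i1 := PySem.List.sorted input01.toList (fun x => x) false
  let i2 := PySem.List.sorted input02.toList (fun x => x) false
  let res := i1.foldl (fun res i =>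
      (PySem.List.pyRange 0 (i2.length : Int) 1).foldl (fun res j =>
        if i = PySem.List.pyGetD i2 j ' ' then res ++ [i] else res) res) ([] : List Char)
  String.ofList res

-- ===== PORT B =====
def findSameChar_alt (input01 : String) (input02 : String) : String :=
  let c1 := input01.toList.foldl (fun d ch => d.insert ch (d.getD ch 0 + 1))
      (PySem.Dict.empty : PySem.Dict Char Int)
  let c2 := input02.toList.foldl (fun d ch => d.insert ch (d.getD ch 0 + 1))
      (PySem.Dict.empty : PySem.Dict Char Int)
  String.ofList (((PySem.List.sorted c1.keys (fun x => x) false).map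
      (fun ch => PySem.List.pyRepeat [ch] (c1.getD ch 0 * c2.getD ch 0))).flatten)

-- ===== PRECONDITION & SPEC =====
def Spec_findSameChar (input01 : String) (input02 : String) (out : String) : Prop := out = findSameChar_alt input01 input02
instance (input01 : String) (input02 : String) (out : String) : Decidable (Spec_findSameChar input01 input02 out) := by unfold Spec_findSameChar; infer_instance

-- ===== CLAIM (what is proved, stated in full; the proofs are below) =====
def Claim_equal_findSameChar : Prop := ∀ (input01 : String) (input02 : String), Dom_findSameChar input01 input02 → Spec_findSameChar input01 input02 (findSameChar input01 input02)

-- ===== LEMMAS AND PROOFS =====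

-- A's inner loop over sorted(input02) appends i once for every occurrence of i.
theorem pvInnerLoop (i : Char) (l : List Char) (acc : List Char) :
    l.foldl (fun acc c => if i = c then acc ++ [i] else acc) acc
      = acc ++ List.replicate (l.count i) i := by
  induction l generalizing acc with
  | nil => simp
  | cons c t ih =>
    by_cases h : i = c
    · subst h
      simp [List.foldl_cons, ih, List.replicate_succ, List.append_assoc]
    · simp [List.foldl_cons, ih, h, Ne.symm h]

theorem pvInner2 (i : Char) (l : List Char) (acc : List Char) :
    (PySem.List.pyRange 0 (l.length : Int) 1).foldl
        (fun acc j => if i = PySem.List.pyGetD l j ' ' then acc ++ [i] else acc) acc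
      = acc ++ List.replicate (l.count i) i := by
  rw [PySem.List.foldl_pyRange_zero_pyGetD' l ' '
        (fun acc c => if i = c then acc ++ [i] else acc) acc]
  exact pvInnerLoop i l acc

theorem pvCountFlat (keys : List Char) (n : Char → Nat) (a : Char) (hnd : keys.Nodup) :
    (keys.flatMap (fun ch => List.replicate (n ch) ch)).count a
      = if a ∈ keys then n a else 0 := by
  induction keys with
  | nil => simp
  | cons k ks ih =>
    rcases List.nodup_cons.mp hnd with ⟨hk, hnd'⟩
    by_cases h : a = k
    · subst h
      simp [List.count_append, ih hnd', hk]
    · simp [List.count_append, List.count_replicate, ih hnd', h, Ne.symm h]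

theorem pvPairFlat (keys : List Char) (n : Char → Nat) (hp : keys.Pairwise (· < ·)) :
    (keys.flatMap (fun ch => List.replicate (n ch) ch)).Pairwise (· ≤ ·) := by
  induction keys with
  | nil => simp
  | cons k ks ih =>
    rcases List.pairwise_cons.mp hp with ⟨hk, hp'⟩
    simp only [List.flatMap_cons]
    refine List.pairwise_append.mpr ⟨List.pairwise_replicate.mpr (Or.inr le_rfl), ih hp', ?_⟩
    intro x hx y hy
    rcases List.mem_flatMap.mp hy with ⟨ch, hch, hy'⟩
    rw [List.eq_of_mem_replicate hx, List.eq_of_mem_replicate hy']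
    exact le_of_lt (hk ch hch)

-- sorted(l) is the concatenation, over the sorted distinct characters, of each character's block.
theorem pvSortedGroups (l : List Char) :
    PySem.List.sorted l (fun x => x) false
      = (PySem.List.sorted (PySem.Set.ofList l) (fun x => x) false).flatMap
          (fun ch => List.replicate (l.count ch) ch) := by
  apply PySem.List.sorted_id_eq_of_perm_of_pairwise
  · refine List.perm_iff_count.mpr (fun a => ?_)
    rw [pvCountFlat _ _ _ ((PySem.List.sorted_perm _ _ _).nodup_iff.mpr (PySem.Set.nodup_ofList l))]
    by_cases h : a ∈ l
    · simp [PySem.List.mem_sorted, PySem.Set.mem_ofList, h]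
    · simp [PySem.List.mem_sorted, PySem.Set.mem_ofList, h, List.count_eq_zero.mpr h]
  · exact pvPairFlat _ _ (PySem.List.sorted_ofList_pairwise_lt l)

theorem pvFlatMapReplicate (n : Nat) (ch : Char) (g : Char → Nat) :
    (List.replicate n ch).flatMap (fun i => List.replicate (g i) i)
      = List.replicate (n * g ch) ch := by
  induction n with
  | zero => simp
  | succ m ih =>
    rw [List.replicate_succ, List.flatMap_cons, ih, ← List.replicate_add]
    congr 1
    ring

-- main grouping fact: per-occurrence emission over sorted l1 = per-distinct-key emission with a count product
theorem pvMain (l1 : List Char) (g : Char → Nat) :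
    (PySem.List.sorted l1 (fun x => x) false).flatMap (fun i => List.replicate (g i) i)
      = (PySem.List.sorted (PySem.Set.ofList l1) (fun x => x) false).flatMap
          (fun ch => List.replicate (l1.count ch * g ch) ch) := by
  rw [pvSortedGroups, List.flatMap_assoc]
  exact List.flatMap_congr (by intro ch _; exact pvFlatMapReplicate _ _ g)

-- ===== VERDICT (by name: the statement is the Claim_ definition above) =====
theorem findSameChar_spec : Claim_equal_findSameChar := by
  intro input01 input02 _
  unfold Spec_findSameChar findSameChar findSameChar_alt
  simp only [pvInner2, PySem.List.foldl_append_eq_flatMap, List.nil_append,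
    PySem.Dict.keys_foldl_insert, PySem.Dict.keys_empty, PySem.Set.update_nil_left,
    PySem.Dict.getD_foldl_insert_add_one, PySem.Dict.getD_empty, zero_add,
    PySem.List.pyRepeat_singleton]
  congr 1
  have hc : ∀ i : Char, (PySem.List.sorted input02.toList (fun x => x) false).count i
      = input02.toList.count i :=
    fun i => (PySem.List.sorted_perm input02.toList (fun x => x) false).count_eq i
  calc (PySem.List.sorted input01.toList (fun x => x) false).flatMap
          (fun i => List.replicate ((PySem.List.sorted input02.toList (fun x => x) false).count i) i)
      = (PySem.List.sorted input01.toList (fun x => x) false).flatMap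
          (fun i => List.replicate (input02.toList.count i) i) := by
        exact List.flatMap_congr (by intro i _; rw [hc])
    _ = (PySem.List.sorted (PySem.Set.ofList input01.toList) (fun x => x) false).flatMap
          (fun ch => List.replicate (input01.toList.count ch * input02.toList.count ch) ch) :=
        pvMain input01.toList (fun i => input02.toList.count i)
    _ = ((PySem.List.sorted (PySem.Set.ofList input01.toList) (fun x => x) false).map
          (fun ch => List.replicate (((input01.toList.count ch : Int) * (input02.toList.count ch : Int))).toNat ch)).flatten := by
        rw [← List.flatMap_def]
        exact List.flatMap_congr (by intro ch _; rw [← Nat.cast_mul, Int.toNat_natCast])
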